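-- pv_equiv track=rewrite | github.com/idealidler/pulseiq-ai-data-platform | api/services/chat_service.py | _normalize_answer_format
-- ===== SOURCE A (Python) =====
-- def _normalize_answer_format(text: str) -> str:
--     normalized = text.replace("\r\n", "\n").strip()
--     replacements = [
--         ("• ", "\n- "),
--         (" - ", "\n- "),
--         (" 1. ", "\n1. "),
--         (" 2. ", "\n2. "),
--         (" 3. ", "\n3. "),
--         (" 4. ", "\n4. "),
--         (" 5. ", "\n5. "),
--     ]
--     for source, target in replacements:
--         normalized = normalized.replace(source, target)
--
--     lines = [line.rstrip() for line in normalized.split("\n")]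
--     cleaned: list[str] = []
--     previous_blank = False
--     for line in lines:
--         is_blank = line.strip() == ""
--         if is_blank and previous_blank:
--             continue
--         cleaned.append(line)
--         previous_blank = is_blank
--     return "\n".join(cleaned).strip()
-- ===== SOURCE B (Python) =====
-- def _normalize_answer_format(text: str) -> str:
--     s = text.replace("\r\n", "\n").strip()
--     replacements = [
--         ("• ", "\n- "),
--         (" - ", "\n- "),
--         (" 1. ", "\n1. "),
--         (" 2. ", "\n2. "),
--         (" 3. ", "\n3. "),
--         (" 4. ", "\n4. "),
--         (" 5. ", "\n5. "),
--     ]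
--     for source, target in replacements:
--         s = s.replace(source, target)
--     # Single character-level pass: no splitting into lines at all.
--     # 'sep' holds the pending newline separator (capped at a blank line),
--     # 'ws' the pending whitespace of the current line; both are emitted
--     # only when a visible character arrives, which performs the per-line
--     # rstrip and the blank-line collapse in one sweep.
--     out = []
--     sep = ""
--     ws = ""
--     for ch in s:
--         if ch == "\n":
--             ws = ""
--             sep = "\n" if sep == "" else "\n\n"
--         elif ch.isspace():
--             ws += ch
--         else:
--             out.append(sep + ws + ch)
--             sep = ""
--             ws = ""
--     return "".join(out).strip()
-- ===== Notes on version B (the rewrite author's own statement) =====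
-- stated objective: alternative
-- what changed: B keeps the replacement chain but never splits the text into lines: a single character-level scan with a pending-separator and pending-whitespace state performs the per-line rstrip, the blank-line collapse and the join in one sweep, instead of A's split / per-line rstrip / stateful line filter / join pipeline.
import Mathlib
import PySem

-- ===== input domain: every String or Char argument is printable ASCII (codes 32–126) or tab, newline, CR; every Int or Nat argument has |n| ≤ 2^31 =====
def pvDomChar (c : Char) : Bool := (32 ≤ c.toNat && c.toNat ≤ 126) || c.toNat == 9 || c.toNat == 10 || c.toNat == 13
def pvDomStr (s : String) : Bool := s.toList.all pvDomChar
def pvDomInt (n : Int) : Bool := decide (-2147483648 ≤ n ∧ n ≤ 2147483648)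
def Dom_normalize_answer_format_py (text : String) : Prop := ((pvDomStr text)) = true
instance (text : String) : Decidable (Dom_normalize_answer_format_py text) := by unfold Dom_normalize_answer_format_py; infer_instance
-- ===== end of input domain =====

-- B keeps A's replacement chain but replaces the split / per-line rstrip / stateful line filter /
-- join pipeline by a single character-level scan with pending-separator and pending-whitespace
-- state; objective: alternative (same cost, genuinely different traversal).


-- ===== PORT A =====
-- A's for-loop body over (cleaned, previous_blank)
def pvAStep (st : List String × Bool) (line : String) : List String × Bool :=
  let is_blank := PySem.Str.strip line == ""
  if is_blank && st.2 then st else (st.1 ++ [line], is_blank)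

def normalize_answer_format_py (text : String) : String :=
  let normalized := PySem.Str.strip (PySem.Str.replace text "\r\n" "\n")
  let replacements : List (String × String) :=
    [("• ", "\n- "), (" - ", "\n- "), (" 1. ", "\n1. "), (" 2. ", "\n2. "),
     (" 3. ", "\n3. "), (" 4. ", "\n4. "), (" 5. ", "\n5. ")]
  let normalized := replacements.foldl (fun s p => PySem.Str.replace s p.1 p.2) normalized
  let lines := ((PySem.Str.split? normalized "\n").getD []).map PySem.Str.rstrip
  let st := lines.foldl pvAStep ([], false)
  PySem.Str.strip (PySem.Str.join "\n" st.1)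

-- ===== PORT B =====
-- B's character loop over (out, sep, ws); out is the concatenation of the appended pieces
def pvBStep (st : List Char × List Char × List Char) (ch : Char) : List Char × List Char × List Char :=
  if ch = '\n' then (st.1, (if st.2.1 = [] then ['\n'] else ['\n', '\n']), [])
  else if PySem.Chars.isspace ch then (st.1, st.2.1, st.2.2 ++ [ch])
  else (st.1 ++ st.2.1 ++ st.2.2 ++ [ch], [], [])

def normalize_answer_format_py_alt (text : String) : String :=
  let s := PySem.Str.strip (PySem.Str.replace text "\r\n" "\n")
  let replacements : List (String × String) :=
    [("• ", "\n- "), (" - ", "\n- "), (" 1. ", "\n1. "), (" 2. ", "\n2. "),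
     (" 3. ", "\n3. "), (" 4. ", "\n4. "), (" 5. ", "\n5. ")]
  let s := replacements.foldl (fun s p => PySem.Str.replace s p.1 p.2) s
  let st := s.toList.foldl pvBStep ([], [], [])
  PySem.Str.strip (String.ofList st.1)

-- ===== PRECONDITION & SPEC =====
def Spec_normalize_answer_format_py (text : String) (out : String) : Prop := out = normalize_answer_format_py_alt text
instance (text : String) (out : String) : Decidable (Spec_normalize_answer_format_py text out) := by unfold Spec_normalize_answer_format_py; infer_instance

-- ===== CLAIM (what is proved, stated in full; the proofs are below) =====
def Claim_equal_normalize_answer_format_py : Prop := ∀ (text : String), Dom_normalize_answer_format_py text → Spec_normalize_answer_format_py text (normalize_answer_format_py text)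

-- ===== LEMMAS AND PROOFS =====

-- structural presentation of PySem's splitOn on the single separator '\n'
def mySplit (pre : List Char) : List Char → List (List Char)
  | [] => [pre]
  | c :: t => if c = '\n' then pre :: mySplit [] t else mySplit (pre ++ [c]) t

-- char-level version of A's blank-collapse loop, on already-rstripped lines
def coll : List (List Char) → Bool → List (List Char)
  | [], _ => []
  | l :: t, pb => if l = [] then (if pb then coll t true else [] :: coll t true) else l :: coll t false

-- B's scan, cut at the '\n' separators: one line at a time
def bLines : List (List Char) → (List Char × List Char × List Char) → List Char
  | [], st => st.1
  | [l], st => (l.foldl pvBStep st).1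
  | l :: l' :: t, st => bLines (l' :: t) (pvBStep (l.foldl pvBStep st) '\n')

theorem go_eq (l : List Char) : ∀ (fuel : Nat) (cur : List Char) (acc : List (List Char)),
    l.length < fuel →
    PySem.Chars.splitOn.go ['\n'] fuel l cur acc = acc.reverse ++ mySplit cur.reverse l := by
  induction l with
  | nil =>
      intro fuel cur acc h
      match fuel, h with
      | f + 1, _ =>
        rw [PySem.Chars.splitOn.go.eq_def]
        simp [mySplit]
  | cons c t ih =>
      intro fuel cur acc h
      match fuel, h with
      | f + 1, h =>
        rw [PySem.Chars.splitOn.go.eq_def]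
        by_cases hc : c = '\n'
        · subst hc
          have hp : (['\n'] : List Char).isPrefixOf ('\n' :: t) = true := by simp [List.isPrefixOf]
          simp only [hp, if_true, List.length_singleton, List.drop_succ_cons, List.drop_zero]
          rw [ih f [] (cur.reverse :: acc) (by simpa using Nat.lt_of_succ_lt_succ h)]
          simp [mySplit]
        · have hp : (['\n'] : List Char).isPrefixOf (c :: t) = false := by
            simp [List.isPrefixOf]
            intro hcc
            exact absurd hcc.symm hc
          simp only [hp, Bool.false_eq_true, if_false]
          rw [ih f (c :: cur) acc (by simpa using Nat.lt_of_succ_lt_succ h)]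
          simp [mySplit, hc]

theorem splitOn_eq (cs : List Char) : PySem.Chars.splitOn cs ['\n'] = mySplit [] cs := by
  unfold PySem.Chars.splitOn
  rw [go_eq cs (cs.length + 1) [] [] (by omega)]
  simp

theorem inter_cons_cons (s a b : List Char) (l : List (List Char)) :
    List.intercalate s (a :: b :: l) = a ++ s ++ List.intercalate s (b :: l) := by
  simp [List.intercalate]

theorem mySplit_ne_nil (l : List Char) : ∀ pre, mySplit pre l ≠ [] := by
  induction l with
  | nil => intro pre; simp [mySplit]
  | cons c t ih =>
      intro pre
      by_cases hc : c = '\n' <;> simp [mySplit, hc, ih]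

theorem inter_mySplit (l : List Char) : ∀ pre, List.intercalate ['\n'] (mySplit pre l) = pre ++ l := by
  induction l with
  | nil => intro pre; simp [mySplit, List.intercalate]
  | cons c t ih =>
      intro pre
      by_cases hc : c = '\n'
      · subst hc
        obtain ⟨a, as, ha⟩ := List.exists_cons_of_ne_nil (mySplit_ne_nil t [])
        simp only [mySplit, if_true]
        rw [ha, inter_cons_cons, ← ha, ih []]
        simp
      · simp only [mySplit, hc, if_false]
        rw [ih (pre ++ [c])]
        simp

theorem mySplit_nlfree (l : List Char) : ∀ pre, '\n' ∉ pre → ∀ p ∈ mySplit pre l, '\n' ∉ p := by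
  induction l with
  | nil =>
      intro pre hpre p hp
      simp [mySplit] at hp
      subst hp; exact hpre
  | cons c t ih =>
      intro pre hpre p hp
      by_cases hc : c = '\n'
      · subst hc
        simp only [mySplit, if_true] at hp
        rcases List.mem_cons.mp hp with rfl | hp'
        · exact hpre
        · exact ih [] (by simp) p hp'
      · simp only [mySplit, hc, if_false] at hp
        refine ih (pre ++ [c]) ?_ p hp
        intro hm
        rcases List.mem_append.mp hm with h1 | h2
        · exact hpre h1
        · simp at h2; exact hc h2.symm

-- basic whitespace lemmas
theorem rstrip_eq_nil_iff (l : List Char) : PySem.Chars.rstrip l = [] ↔ l.all PySem.Chars.isspace := by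
  simp [PySem.Chars.rstrip, List.dropWhile_eq_nil_iff, List.all_eq_true]

theorem rstrip_cons_visible (c : Char) (t : List Char) (h : PySem.Chars.isspace c = false) :
    PySem.Chars.rstrip (c :: t) = c :: PySem.Chars.rstrip t := by
  simp only [PySem.Chars.rstrip, List.reverse_cons, List.dropWhile_append]
  by_cases hd : (List.dropWhile PySem.Chars.isspace t.reverse).isEmpty = true
  · simp [List.isEmpty_iff.mp hd, h]
  · simp [hd]

theorem rstrip_cons_ne_nil (c : Char) (t : List Char) (h : PySem.Chars.rstrip t ≠ []) :
    PySem.Chars.rstrip (c :: t) = c :: PySem.Chars.rstrip t := by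
  have hd : (List.dropWhile PySem.Chars.isspace t.reverse).isEmpty = false := by
    rw [List.isEmpty_eq_false_iff]
    intro hc
    exact h (by simp [PySem.Chars.rstrip, hc])
  simp [PySem.Chars.rstrip, List.dropWhile_append, hd]

theorem dropWhile_dropWhile {α : Type} (p : α → Bool) (l : List α) :
    (l.dropWhile p).dropWhile p = l.dropWhile p := by
  induction l with
  | nil => rfl
  | cons a t ih =>
      by_cases h : p a = true
      · simp [h, ih]
      · simp [h]

theorem rstrip_rstrip (l : List Char) :
    PySem.Chars.rstrip (PySem.Chars.rstrip l) = PySem.Chars.rstrip l := by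
  simp [PySem.Chars.rstrip, dropWhile_dropWhile]

theorem lstrip_append_ws (w x : List Char) (h : w.all PySem.Chars.isspace) :
    PySem.Chars.lstrip (w ++ x) = PySem.Chars.lstrip x := by
  have hd : List.dropWhile PySem.Chars.isspace w = [] := by
    rw [List.dropWhile_eq_nil_iff]
    intro x hx
    exact List.all_eq_true.mp h x hx
  simp [PySem.Chars.lstrip, List.dropWhile_append, hd]

theorem lstrip_append_visible (x y : List Char) (h : ¬ x.all PySem.Chars.isspace = true) :
    PySem.Chars.lstrip (x ++ y) = PySem.Chars.lstrip x ++ y := by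
  have hd : (List.dropWhile PySem.Chars.isspace x).isEmpty = false := by
    rw [List.isEmpty_eq_false_iff]
    intro hc
    exact h (List.all_eq_true.mpr (List.dropWhile_eq_nil_iff.mp hc))
  simp [PySem.Chars.lstrip, List.dropWhile_append, hd]

theorem rstrip_append_ws (x w : List Char) (h : w.all PySem.Chars.isspace) :
    PySem.Chars.rstrip (x ++ w) = PySem.Chars.rstrip x := by
  have hd : List.dropWhile PySem.Chars.isspace w.reverse = [] := by
    rw [List.dropWhile_eq_nil_iff]
    intro x hx
    exact List.all_eq_true.mp h x (List.mem_reverse.mp hx)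
  simp [PySem.Chars.rstrip, List.dropWhile_append, hd]

theorem rstrip_append_fixed (x r : List Char) (h : PySem.Chars.rstrip r = r) (hne : r ≠ []) :
    PySem.Chars.rstrip (x ++ r) = x ++ r := by
  have hfix : List.dropWhile PySem.Chars.isspace r.reverse = r.reverse := by
    have := congrArg List.reverse h
    simpa [PySem.Chars.rstrip] using this
  have hd : (List.dropWhile PySem.Chars.isspace r.reverse).isEmpty = false := by
    rw [hfix, List.isEmpty_eq_false_iff]
    simpa using hne
  simp [PySem.Chars.rstrip, List.dropWhile_append, hfix]
  exact fun hc => absurd hc hne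

theorem strip_nil_iff (cs : List Char) (h : PySem.Chars.rstrip cs = cs) :
    PySem.Chars.strip cs = [] ↔ cs = [] := by
  constructor
  · intro hs
    by_contra hne
    have hnotall : ¬ ∀ c ∈ cs, PySem.Chars.isspace c = true := by
      intro hall
      have hd : List.dropWhile PySem.Chars.isspace cs.reverse = [] :=
        List.dropWhile_eq_nil_iff.mpr (fun c hc => hall c (List.mem_reverse.mp hc))
      apply hne
      unfold PySem.Chars.rstrip at h
      rw [hd] at h
      simpa using h.symm
    push Not at hnotall
    obtain ⟨c, hmem, hws⟩ := hnotall
    have hws' : PySem.Chars.isspace c = false := by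
      cases hx : PySem.Chars.isspace c
      · rfl
      · exact absurd hx hws
    have hmem' : c ∈ PySem.Chars.lstrip cs := by
      unfold PySem.Chars.lstrip
      have hsplit := List.takeWhile_append_dropWhile (p := PySem.Chars.isspace) (l := cs)
      rcases List.mem_append.mp (hsplit ▸ hmem) with h1 | h2
      · exact absurd (List.mem_takeWhile_imp h1) (by simp [hws'])
      · exact h2
    unfold PySem.Chars.strip PySem.Chars.rstrip at hs
    have hd2 : List.dropWhile PySem.Chars.isspace (PySem.Chars.lstrip cs).reverse = [] := by
      have := congrArg List.reverse hs
      simpa using this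
    have hall2 := List.dropWhile_eq_nil_iff.mp hd2 c (List.mem_reverse.mpr hmem')
    rw [hws'] at hall2
    exact absurd hall2 (by simp)
  · rintro rfl; rfl

-- B's scan across one newline-free line
theorem bline_ws (l : List Char) : ∀ out sep ws, l.all PySem.Chars.isspace → '\n' ∉ l →
    l.foldl pvBStep (out, sep, ws) = (out, sep, ws ++ l) := by
  induction l with
  | nil => intro out sep ws _ _; simp
  | cons c t ih =>
      intro out sep ws hall hnl
      have hc : c ≠ '\n' := by intro h; exact hnl (h ▸ List.mem_cons_self)
      have hcs : PySem.Chars.isspace c = true := by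
        have := List.all_eq_true.mp hall c List.mem_cons_self
        simpa using this
      have hall' : t.all PySem.Chars.isspace := by
        rw [List.all_eq_true] at hall ⊢
        exact fun x hx => hall x (List.mem_cons_of_mem _ hx)
      have hnl' : '\n' ∉ t := fun h => hnl (List.mem_cons_of_mem _ h)
      simp only [List.foldl_cons, pvBStep, hc, if_false, hcs, if_true]
      rw [ih out sep (ws ++ [c]) hall' hnl']
      simp

theorem bline_vis (l : List Char) : ∀ out sep ws, ¬ l.all PySem.Chars.isspace = true → '\n' ∉ l →
    ∃ w, l.foldl pvBStep (out, sep, ws) = (out ++ sep ++ ws ++ PySem.Chars.rstrip l, [], w) := by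
  induction l with
  | nil => intro out sep ws hall _; simp at hall
  | cons c t ih =>
      intro out sep ws hall hnl
      have hc : c ≠ '\n' := by intro h; exact hnl (h ▸ List.mem_cons_self)
      have hnl' : '\n' ∉ t := fun h => hnl (List.mem_cons_of_mem _ h)
      by_cases hcs : PySem.Chars.isspace c = true
      · have hall' : ¬ t.all PySem.Chars.isspace = true := by
          intro hta
          exact hall (by simp [List.all_cons, hcs, hta])
        have hrt : PySem.Chars.rstrip t ≠ [] := by
          intro h0
          exact hall' ((rstrip_eq_nil_iff t).mp h0)
        simp only [List.foldl_cons, pvBStep, hc, if_false, hcs, if_true]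
        obtain ⟨w, hw⟩ := ih out sep (ws ++ [c]) hall' hnl'
        refine ⟨w, ?_⟩
        rw [hw, rstrip_cons_ne_nil c t hrt]
        simp
      · have hcs' : PySem.Chars.isspace c = false := by
          cases h : PySem.Chars.isspace c
          · rfl
          · exact absurd h hcs
        simp only [List.foldl_cons, pvBStep, hc, if_false, hcs, Bool.false_eq_true, if_false]
        by_cases hta : t.all PySem.Chars.isspace = true
        · rw [bline_ws t (out ++ sep ++ ws ++ [c]) [] [] hta hnl']
          refine ⟨t, ?_⟩
          have hrt : PySem.Chars.rstrip t = [] := (rstrip_eq_nil_iff t).mpr hta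
          rw [rstrip_cons_visible c t hcs', hrt]
          simp
        · obtain ⟨w, hw⟩ := ih (out ++ sep ++ ws ++ [c]) [] [] hta hnl'
          refine ⟨w, ?_⟩
          rw [hw]
          have hrt : PySem.Chars.rstrip t ≠ [] := by
            intro h0
            exact hta ((rstrip_eq_nil_iff t).mp h0)
          rw [rstrip_cons_ne_nil c t hrt]
          simp

-- A's String-level loop equals coll on the char level
theorem afold_coll (rl : List (List Char)) : ∀ (acc : List String) (pb : Bool),
    (∀ p ∈ rl, PySem.Chars.rstrip p = p) →
    ((rl.map String.ofList).foldl pvAStep (acc, pb)).1 = acc ++ (coll rl pb).map String.ofList := by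
  induction rl with
  | nil => intro acc pb _; simp [coll]
  | cons p t ih =>
      intro acc pb hfix
      have hp : PySem.Chars.rstrip p = p := hfix p List.mem_cons_self
      have hfix' : ∀ q ∈ t, PySem.Chars.rstrip q = q :=
        fun q hq => hfix q (List.mem_cons_of_mem _ hq)
      have hblank : (PySem.Str.strip (String.ofList p) == "") = decide (p = []) := by
        have h1 : PySem.Str.strip (String.ofList p) = String.ofList (PySem.Chars.strip p) := by
          simp [PySem.Str.strip]
        rw [h1]
        by_cases hpe : PySem.Chars.strip p = []
        · have : p = [] := (strip_nil_iff p hp).mp hpe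
          subst this
          simp [String.ofList_eq_empty_iff]
          rfl
        · have : p ≠ [] := fun hc => hpe ((strip_nil_iff p hp).mpr hc)
          simp [String.ofList_eq_empty_iff, hpe, this]
      simp only [List.map_cons, List.foldl_cons, pvAStep, hblank]
      by_cases hpe : p = []
      · subst hpe
        cases pb with
        | true =>
            simp only [decide_true, Bool.true_and, if_true]
            rw [ih acc true hfix']
            simp [coll]
        | false =>
            simp only [decide_true, Bool.true_and, Bool.false_eq_true, if_false]
            rw [ih (acc ++ [String.ofList []]) true hfix']
            simp [coll]
      · simp only [hpe, decide_false, Bool.false_and, Bool.false_eq_true, if_false]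
        rw [ih (acc ++ [String.ofList p]) false hfix']
        simp [coll, hpe]

-- the invariant tying A's collapsed prefix to B's state at a line boundary
def pvInv (C : List (List Char)) (pb : Bool) (out sep : List Char) : Prop :=
  (out = [] ∧ ((C = [] ∧ pb = false ∧ sep = []) ∨
               (C = [[]] ∧ pb = true ∧ (sep = ['\n'] ∨ sep = ['\n', '\n'])))) ∨
  ((¬ out.all PySem.Chars.isspace = true) ∧
    ((pb = false ∧ sep = ['\n'] ∧
        PySem.Chars.lstrip (List.intercalate ['\n'] C) = PySem.Chars.lstrip out) ∨
     (pb = true ∧ sep = ['\n', '\n'] ∧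
        PySem.Chars.lstrip (List.intercalate ['\n'] C) = PySem.Chars.lstrip out ++ ['\n'])))


theorem lstrip_eq_nil_iff (l : List Char) : PySem.Chars.lstrip l = [] ↔ l.all PySem.Chars.isspace := by
  simp [PySem.Chars.lstrip, List.dropWhile_eq_nil_iff, List.all_eq_true]

theorem strip_eq (l : List Char) : PySem.Chars.strip l = PySem.Chars.rstrip (PySem.Chars.lstrip l) := rfl

theorem rstrip_not_all_ws (l : List Char) (h : PySem.Chars.rstrip l ≠ []) :
    ¬ (PySem.Chars.rstrip l).all PySem.Chars.isspace = true := by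
  intro hall
  have := (rstrip_eq_nil_iff (PySem.Chars.rstrip l)).mpr hall
  rw [rstrip_rstrip] at this
  exact h this

theorem inter_append_single (C : List (List Char)) (x : List Char) (hC : C ≠ []) :
    List.intercalate ['\n'] (C ++ [x]) = List.intercalate ['\n'] C ++ '\n' :: x := by
  induction C with
  | nil => exact absurd rfl hC
  | cons a t ih =>
      cases t with
      | nil => simp [List.intercalate]
      | cons b u =>
          rw [show (a :: b :: u) ++ [x] = a :: ((b :: u) ++ [x]) from rfl]
          rw [show a :: ((b :: u) ++ [x]) = a :: b :: (u ++ [x]) from rfl, inter_cons_cons,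
              show (b :: (u ++ [x])) = (b :: u) ++ [x] from rfl, ih (by simp), inter_cons_cons]
          simp

theorem interC_info (C : List (List Char)) (out e : List Char)
    (h : PySem.Chars.lstrip (List.intercalate ['\n'] C) = PySem.Chars.lstrip out ++ e)
    (hvis : ¬ out.all PySem.Chars.isspace = true) :
    ¬ (List.intercalate ['\n'] C).all PySem.Chars.isspace = true ∧ C ≠ [] := by
  have hlo : PySem.Chars.lstrip out ≠ [] := by
    intro hc
    exact hvis ((lstrip_eq_nil_iff out).mp hc)
  have hne : PySem.Chars.lstrip (List.intercalate ['\n'] C) ≠ [] := by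
    rw [h]
    intro hc
    exact hlo (List.append_eq_nil_iff.mp hc).1
  constructor
  · intro hall
    exact hne ((lstrip_eq_nil_iff _).mpr hall)
  · intro hc
    subst hc
    exact hne rfl

theorem ws_sep (sep : List Char) (h : sep = [] ∨ sep = ['\n'] ∨ sep = ['\n', '\n']) :
    sep.all PySem.Chars.isspace = true := by
  rcases h with rfl | rfl | rfl <;> decide

theorem not_all_ws_append_left (out sep : List Char) (hvis : ¬ out.all PySem.Chars.isspace = true) :
    ¬ (out ++ sep).all PySem.Chars.isspace = true := by
  intro hall
  simp only [List.all_append, Bool.and_eq_true] at hall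
  exact hvis hall.1

theorem lstrip_out_sep_r (out sep r : List Char) (hvis : ¬ out.all PySem.Chars.isspace = true) :
    PySem.Chars.lstrip (out ++ sep ++ r) = PySem.Chars.lstrip out ++ sep ++ r := by
  rw [lstrip_append_visible (out ++ sep) r (not_all_ws_append_left out sep hvis),
      lstrip_append_visible out sep hvis]

-- invariant preservation: a blank line followed by the newline step
theorem stepBlank (C : List (List Char)) (pb : Bool) (out sep : List Char)
    (h : pvInv C pb out sep) :
    pvInv (C ++ (if pb then [] else [[]])) true out (if sep = [] then ['\n'] else ['\n', '\n']) := by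
  rcases h with ⟨hout, ⟨hC, hpb, hsep⟩ | ⟨hC, hpb, hsep⟩⟩ | ⟨hvis, ⟨hpb, hsep, hl⟩ | ⟨hpb, hsep, hl⟩⟩
  · subst hC hpb hsep hout
    exact Or.inl ⟨rfl, Or.inr ⟨rfl, rfl, Or.inl rfl⟩⟩
  · subst hC hpb hout
    refine Or.inl ⟨rfl, Or.inr ⟨by simp, rfl, Or.inr ?_⟩⟩
    rcases hsep with rfl | rfl <;> simp
  · subst hpb hsep
    obtain ⟨hiv, hCne⟩ := interC_info C out [] (by simpa using hl) hvis
    refine Or.inr ⟨hvis, Or.inr ⟨rfl, by simp, ?_⟩⟩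
    simp only [Bool.false_eq_true, if_false]
    rw [inter_append_single C [] hCne]
    rw [show List.intercalate ['\n'] C ++ '\n' :: [] = List.intercalate ['\n'] C ++ ['\n'] by simp]
    rw [lstrip_append_visible _ _ hiv, hl]
  · subst hpb hsep
    refine Or.inr ⟨hvis, Or.inr ⟨rfl, by simp, ?_⟩⟩
    simpa using hl

-- invariant preservation: a line with visible content followed by the newline step
theorem stepVis (C : List (List Char)) (pb : Bool) (out sep : List Char) (r : List Char)
    (hrf : PySem.Chars.rstrip r = r) (hrne : r ≠ [])
    (h : pvInv C pb out sep) :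
    pvInv (C ++ [r]) false (out ++ sep ++ r) ['\n'] := by
  have hrv : ¬ r.all PySem.Chars.isspace = true := by
    have := rstrip_not_all_ws r (by rw [hrf]; exact hrne)
    rwa [hrf] at this
  have hov : ¬ (out ++ sep ++ r).all PySem.Chars.isspace = true := by
    intro hall
    simp only [List.all_append, Bool.and_eq_true] at hall
    exact hrv hall.2
  rcases h with ⟨hout, ⟨hC, hpb, hsep⟩ | ⟨hC, hpb, hsep⟩⟩ | ⟨hvis, ⟨hpb, hsep, hl⟩ | ⟨hpb, hsep, hl⟩⟩
  · subst hC hpb hsep hout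
    exact Or.inr ⟨hov, Or.inl ⟨rfl, rfl, by simp [List.intercalate]⟩⟩
  · subst hC hpb hout
    refine Or.inr ⟨hov, Or.inl ⟨rfl, rfl, ?_⟩⟩
    have h1 : List.intercalate ['\n'] ([[]] ++ [r]) = ['\n'] ++ r := by
      simp [List.intercalate]
    rw [h1, lstrip_append_ws ['\n'] r (by decide),
        show ([] : List Char) ++ sep ++ r = sep ++ r by simp,
        lstrip_append_ws sep r (ws_sep sep (by tauto))]
  · subst hpb hsep
    obtain ⟨hiv, hCne⟩ := interC_info C out [] (by simpa using hl) hvis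
    refine Or.inr ⟨hov, Or.inl ⟨rfl, rfl, ?_⟩⟩
    rw [inter_append_single C r hCne, lstrip_append_visible _ _ hiv, hl,
        lstrip_out_sep_r out ['\n'] r hvis]
    simp
  · subst hpb hsep
    obtain ⟨hiv, hCne⟩ := interC_info C out ['\n'] hl hvis
    refine Or.inr ⟨hov, Or.inl ⟨rfl, rfl, ?_⟩⟩
    rw [inter_append_single C r hCne, lstrip_append_visible _ _ hiv, hl,
        lstrip_out_sep_r out ['\n', '\n'] r hvis]
    simp

-- final line, blank
theorem finBlank (C : List (List Char)) (pb : Bool) (out sep : List Char)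
    (h : pvInv C pb out sep) :
    PySem.Chars.strip (List.intercalate ['\n'] (C ++ (if pb then [] else [[]]))) = PySem.Chars.strip out := by
  rcases h with ⟨hout, ⟨hC, hpb, hsep⟩ | ⟨hC, hpb, hsep⟩⟩ | ⟨hvis, ⟨hpb, hsep, hl⟩ | ⟨hpb, hsep, hl⟩⟩
  · subst hC hpb hout
    simp only [List.nil_append]
    rfl
  · subst hC hpb hout
    simp only [if_true, List.append_nil]
    rfl
  · subst hpb hsep
    obtain ⟨hiv, hCne⟩ := interC_info C out [] (by simpa using hl) hvis
    simp only [Bool.false_eq_true, if_false]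
    rw [inter_append_single C [] hCne,
        show List.intercalate ['\n'] C ++ '\n' :: [] = List.intercalate ['\n'] C ++ ['\n'] by simp,
        strip_eq, strip_eq, lstrip_append_visible _ _ hiv, hl,
        rstrip_append_ws _ ['\n'] (by decide)]
  · subst hpb hsep
    simp only [if_true, List.append_nil]
    rw [strip_eq, strip_eq, hl, rstrip_append_ws _ ['\n'] (by decide)]

-- final line, visible content
theorem finVis (C : List (List Char)) (pb : Bool) (out sep : List Char) (r : List Char)
    (hrf : PySem.Chars.rstrip r = r) (hrne : r ≠ [])
    (h : pvInv C pb out sep) :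
    PySem.Chars.strip (List.intercalate ['\n'] (C ++ [r])) = PySem.Chars.strip (out ++ sep ++ r) := by
  rcases h with ⟨hout, ⟨hC, hpb, hsep⟩ | ⟨hC, hpb, hsep⟩⟩ | ⟨hvis, ⟨hpb, hsep, hl⟩ | ⟨hpb, hsep, hl⟩⟩
  · subst hC hpb hsep hout; simp [List.intercalate]
  · subst hC hpb hout
    have h1 : List.intercalate ['\n'] ([[]] ++ [r]) = ['\n'] ++ r := by
      simp [List.intercalate]
    rw [h1, strip_eq, strip_eq, lstrip_append_ws ['\n'] r (by decide),
        show ([] : List Char) ++ sep ++ r = sep ++ r by simp,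
        lstrip_append_ws sep r (ws_sep sep (by tauto))]
  · subst hpb hsep
    obtain ⟨hiv, hCne⟩ := interC_info C out [] (by simpa using hl) hvis
    rw [inter_append_single C r hCne, strip_eq, strip_eq,
        lstrip_append_visible _ _ hiv, hl, lstrip_out_sep_r out ['\n'] r hvis,
        show PySem.Chars.lstrip out ++ '\n' :: r = (PySem.Chars.lstrip out ++ ['\n']) ++ r by simp,
        rstrip_append_fixed _ r hrf hrne]
  · subst hpb hsep
    obtain ⟨hiv, hCne⟩ := interC_info C out ['\n'] hl hvis
    rw [inter_append_single C r hCne, strip_eq, strip_eq,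
        lstrip_append_visible _ _ hiv, hl, lstrip_out_sep_r out ['\n', '\n'] r hvis,
        show (PySem.Chars.lstrip out ++ ['\n']) ++ '\n' :: r = (PySem.Chars.lstrip out ++ ['\n', '\n']) ++ r by simp,
        rstrip_append_fixed _ r hrf hrne]

theorem grand (ls : List (List Char)) : ∀ C pb out sep,
    (∀ l ∈ ls, '\n' ∉ l) → ls ≠ [] → pvInv C pb out sep →
    PySem.Chars.strip (List.intercalate ['\n'] (C ++ coll (ls.map PySem.Chars.rstrip) pb)) =
      PySem.Chars.strip (bLines ls (out, sep, [])) := by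
  induction ls with
  | nil => intro C pb out sep _ h _; exact absurd rfl h
  | cons l rest ih =>
      intro C pb out sep hnl _ hinv
      have hnll : '\n' ∉ l := hnl l List.mem_cons_self
      have hnl' : ∀ x ∈ rest, '\n' ∉ x := fun x hx => hnl x (List.mem_cons_of_mem _ hx)
      cases rest with
      | nil =>
          by_cases hb : l.all PySem.Chars.isspace = true
          · have hr : PySem.Chars.rstrip l = [] := (rstrip_eq_nil_iff l).mpr hb
            have hcoll : coll [PySem.Chars.rstrip l] pb = (if pb then [] else [[]]) := by
              rw [hr]; cases pb <;> rfl
            simp only [bLines, List.map_cons, List.map_nil]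
            rw [bline_ws l out sep [] hb hnll, hcoll]
            exact finBlank C pb out sep hinv
          · have hrne : PySem.Chars.rstrip l ≠ [] := fun h0 => hb ((rstrip_eq_nil_iff l).mp h0)
            have hcoll : coll [PySem.Chars.rstrip l] pb = [PySem.Chars.rstrip l] := by
              simp [coll, hrne]
            obtain ⟨w, hw⟩ := bline_vis l out sep [] hb hnll
            simp only [bLines, List.map_cons, List.map_nil]
            rw [hw, hcoll]
            have := finVis C pb out sep (PySem.Chars.rstrip l) (rstrip_rstrip l) hrne hinv
            simpa using this
      | cons l' t =>
          have hne' : (l' :: t : List (List Char)) ≠ [] := by simp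
          by_cases hb : l.all PySem.Chars.isspace = true
          · have hr : PySem.Chars.rstrip l = [] := (rstrip_eq_nil_iff l).mpr hb
            have hstep := stepBlank C pb out sep hinv
            simp only [bLines, List.map_cons]
            rw [bline_ws l out sep [] hb hnll]
            have hnlstep : pvBStep (out, sep, [] ++ l) '\n' =
                (out, (if sep = [] then ['\n'] else ['\n', '\n']), []) := by
              simp [pvBStep]
            rw [hnlstep, hr]
            cases pb with
            | true =>
                have hcoll : coll ([] :: PySem.Chars.rstrip l' :: List.map PySem.Chars.rstrip t) true =
                    coll (PySem.Chars.rstrip l' :: List.map PySem.Chars.rstrip t) true := rfl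
                rw [hcoll]
                have := ih C true out (if sep = [] then ['\n'] else ['\n', '\n']) hnl' hne'
                  (by simpa using hstep)
                simpa using this
            | false =>
                have hcoll : C ++ coll ([] :: PySem.Chars.rstrip l' :: List.map PySem.Chars.rstrip t) false =
                    (C ++ [[]]) ++ coll (PySem.Chars.rstrip l' :: List.map PySem.Chars.rstrip t) true := by
                  simp [coll]
                rw [hcoll]
                have := ih (C ++ [[]]) true out (if sep = [] then ['\n'] else ['\n', '\n']) hnl' hne'
                  (by simpa using hstep)
                simpa using this
          · have hrne : PySem.Chars.rstrip l ≠ [] := fun h0 => hb ((rstrip_eq_nil_iff l).mp h0)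
            have hstep := stepVis C pb out sep (PySem.Chars.rstrip l) (rstrip_rstrip l) hrne hinv
            obtain ⟨w, hw⟩ := bline_vis l out sep [] hb hnll
            simp only [bLines, List.map_cons]
            rw [hw]
            have hnlstep : pvBStep (out ++ sep ++ [] ++ PySem.Chars.rstrip l, [], w) '\n' =
                (out ++ sep ++ [] ++ PySem.Chars.rstrip l, ['\n'], []) := by
              simp [pvBStep]
            rw [hnlstep]
            have hcoll : C ++ coll (PySem.Chars.rstrip l :: PySem.Chars.rstrip l' :: List.map PySem.Chars.rstrip t) pb =
                (C ++ [PySem.Chars.rstrip l]) ++ coll (PySem.Chars.rstrip l' :: List.map PySem.Chars.rstrip t) false := by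
              simp [coll, hrne]
            rw [hcoll]
            have := ih (C ++ [PySem.Chars.rstrip l]) false (out ++ sep ++ PySem.Chars.rstrip l) ['\n']
              hnl' hne' hstep
            simpa using this

theorem fold_split (ls : List (List Char)) : ∀ st, ls ≠ [] →
    ((List.intercalate ['\n'] ls).foldl pvBStep st).1 = bLines ls st := by
  induction ls with
  | nil => intro st h; exact absurd rfl h
  | cons l rest ih =>
      intro st _
      cases rest with
      | nil => simp [bLines, List.intercalate]
      | cons l' t =>
          rw [inter_cons_cons]
          rw [show l ++ ['\n'] ++ List.intercalate ['\n'] (l' :: t)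
              = l ++ (['\n'] ++ List.intercalate ['\n'] (l' :: t)) by simp]
          rw [List.foldl_append, List.foldl_append]
          simp only [List.foldl_cons, List.foldl_nil]
          rw [ih (pvBStep (List.foldl pvBStep st l) '\n') (by simp)]
          rfl

theorem core (s : String) :
    PySem.Str.strip (PySem.Str.join "\n"
      (((((PySem.Str.split? s "\n").getD []).map PySem.Str.rstrip).foldl pvAStep ([], false)).1)) =
    PySem.Str.strip (String.ofList ((s.toList.foldl pvBStep ([], [], [])).1)) := by
  have hsplit : (PySem.Str.split? s "\n").getD [] = (mySplit [] s.toList).map String.ofList := by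
    have h1 : PySem.Chars.split? s.toList ['\n'] = some (PySem.Chars.splitOn s.toList ['\n']) := rfl
    simp [PySem.Str.split?, h1, splitOn_eq]
  have hlines : ((PySem.Str.split? s "\n").getD []).map PySem.Str.rstrip =
      ((mySplit [] s.toList).map PySem.Chars.rstrip).map String.ofList := by
    rw [hsplit, List.map_map, List.map_map]
    apply List.map_congr_left
    intro p _
    simp [Function.comp, PySem.Str.rstrip]
  rw [hlines]
  set rl := (mySplit [] s.toList).map PySem.Chars.rstrip with hrl
  have hfix : ∀ p ∈ rl, PySem.Chars.rstrip p = p := by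
    intro p hp
    rw [hrl] at hp
    obtain ⟨q, _, rfl⟩ := List.mem_map.mp hp
    exact rstrip_rstrip q
  rw [afold_coll rl [] false hfix]
  have hjoin : PySem.Str.strip (PySem.Str.join "\n" ([] ++ (coll rl false).map String.ofList)) =
      String.ofList (PySem.Chars.strip (List.intercalate ['\n'] (coll rl false))) := by
    simp [PySem.Str.join, PySem.Str.strip, PySem.Chars.join, List.map_map, Function.comp_def]
  rw [hjoin]
  have hbs : PySem.Str.strip (String.ofList ((s.toList.foldl pvBStep ([], [], [])).1)) =
      String.ofList (PySem.Chars.strip ((s.toList.foldl pvBStep ([], [], [])).1)) := by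
    simp [PySem.Str.strip]
  rw [hbs]
  apply congrArg
  have hnl : ∀ l ∈ mySplit [] s.toList, '\n' ∉ l := mySplit_nlfree s.toList [] (by simp)
  have hne : mySplit [] s.toList ≠ [] := mySplit_ne_nil s.toList []
  have hfold : ((s.toList.foldl pvBStep (([], [], []) : List Char × List Char × List Char))).1 =
      bLines (mySplit [] s.toList) ([], [], []) := by
    conv_lhs => rw [show s.toList = List.intercalate ['\n'] (mySplit [] s.toList) from (inter_mySplit s.toList []).symm]
    exact fold_split (mySplit [] s.toList) ([], [], []) hne
  rw [hfold]
  have hinv0 : pvInv [] false [] [] := Or.inl ⟨rfl, Or.inl ⟨rfl, rfl, rfl⟩⟩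
  have := grand (mySplit [] s.toList) [] false [] [] hnl hne hinv0
  simpa [hrl] using this

-- ===== VERDICT (by name: the statement is the Claim_ definition above) =====
theorem normalize_answer_format_py_spec : Claim_equal_normalize_answer_format_py := by
  intro text _
  unfold Spec_normalize_answer_format_py
  simp only [normalize_answer_format_py, normalize_answer_format_py_alt]
  exact core _
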